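-- pv_equiv track=rewrite | github.com/Gunner-git/Hackerrank-and-Leetcode-practice | Leetcode/Count Prefixes of a Given String.py | countPrefixes
-- ===== SOURCE A (Python) =====
-- from typing import List
--
-- def countPrefixes(words: List[str], s: str) -> int:
--     firstLetters = ''
--     count = 0
--
--     for i in s:
--         firstLetters += i
--
--         for pref in words:
--             if pref == firstLetters:
--                 count += 1
--
--     return count
-- ===== SOURCE B (Python) =====
-- def countPrefixes(words, s):
--     # Build a trie of the words; each node stores under the key None the
--     # number of words ending at that node.
--     root = {}
--     for w in words:
--         node = root
--         for ch in w:
--             if ch not in node: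
--                 node[ch] = {}
--             node = node[ch]
--         node[None] = node.get(None, 0) + 1
--     # Walk s down the trie, adding each visited node's end-count.
--     total = 0
--     node = root
--     for ch in s:
--         if ch not in node:
--             break
--         node = node[ch]
--         total += node.get(None, 0)
--     return total
-- ===== Notes on version B (the rewrite author's own statement) =====
-- stated objective: faster
-- what changed: B builds a trie of the words (with per-node end-counts for duplicates) and walks s once down the trie, breaking at the first missing child, instead of A's rescan of the whole word list for every prefix of s.
import Mathlib
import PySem

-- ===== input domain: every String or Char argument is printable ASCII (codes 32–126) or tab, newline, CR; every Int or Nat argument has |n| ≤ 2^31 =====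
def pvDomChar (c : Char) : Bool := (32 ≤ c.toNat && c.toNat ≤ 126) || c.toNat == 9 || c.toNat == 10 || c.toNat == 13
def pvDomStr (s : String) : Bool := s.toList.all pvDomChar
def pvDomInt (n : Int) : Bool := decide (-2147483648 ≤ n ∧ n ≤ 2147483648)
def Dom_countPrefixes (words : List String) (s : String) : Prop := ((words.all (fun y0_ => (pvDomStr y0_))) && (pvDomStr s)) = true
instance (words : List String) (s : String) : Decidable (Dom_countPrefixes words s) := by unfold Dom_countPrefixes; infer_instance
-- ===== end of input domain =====

-- B builds a trie of the words (end-counts at nodes) and walks s down it once,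
-- replacing A's rescan of the whole word list for every prefix of s (faster).


-- ===== PORT A =====
-- strings handled on the List Char side (PySem convention); firstLetters += i
-- becomes appending the char to the accumulated list
def countPrefixes (words : List String) (s : String) : Int :=
  (s.toList.foldl
    (fun (st : List Char × Int) i =>
      let firstLetters := st.1 ++ [i]
      (firstLetters,
        words.foldl (fun count pref => if pref.toList == firstLetters then count + 1 else count) st.2))
    ([], 0)).2

-- ===== PORT B =====
-- a trie node: end-count (words ending here) and the children, as a mutual pair
-- (Python's nested dicts keyed by chars, with the end-count under key None)
mutual
inductive PTrie where
  | mk : Int → PKids → PTrie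
inductive PKids where
  | nil : PKids
  | cons : Char → PTrie → PKids → PKids
end

def PTrie.endCount : PTrie → Int
  | .mk n _ => n

-- child lookup = Python's `node[ch]` / `ch in node` on the children dict
def kidsFind : PKids → Char → Option PTrie
  | .nil, _ => none
  | .cons c t rest, c' => if c' = c then some t else kidsFind rest c'

-- replace the child for c (or append it) = Python's `node[ch] = …`
def kidsSet : PKids → Char → PTrie → PKids
  | .nil, c, t => .cons c t .nil
  | .cons c t rest, c', t' => if c' = c then .cons c t' rest else .cons c t (kidsSet rest c' t')

-- insert one word: descend (creating empty children), bump end-count at the end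
def trieInsert : List Char → PTrie → PTrie
  | [], .mk n k => .mk (n + 1) k
  | c :: cs, .mk n k =>
      let child := (kidsFind k c).getD (.mk 0 .nil)
      .mk n (kidsSet k c (trieInsert cs child))

-- walk s down the trie, breaking at a missing child, summing end-counts
def trieWalk : List Char → PTrie → Int → Int
  | [], _, acc => acc
  | c :: cs, .mk _ k, acc =>
      match kidsFind k c with
      | none => acc
      | some child => trieWalk cs child (acc + child.endCount)

def countPrefixes_alt (words : List String) (s : String) : Int :=
  let root := words.foldl (fun t w => trieInsert w.toList t) (PTrie.mk 0 .nil)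
  trieWalk s.toList root 0

-- ===== PRECONDITION & SPEC =====
def Spec_countPrefixes (words : List String) (s : String) (out : Int) : Prop := out = countPrefixes_alt words s
instance (words : List String) (s : String) (out : Int) : Decidable (Spec_countPrefixes words s out) := by unfold Spec_countPrefixes; infer_instance

-- ===== CLAIM (what is proved, stated in full; the proofs are below) =====
def Claim_equal_countPrefixes : Prop := ∀ (words : List String) (s : String), Dom_countPrefixes words s → Spec_countPrefixes words s (countPrefixes words s)

-- ===== LEMMAS AND PROOFS =====

-- the value stored in the trie at path v (0 if the path is missing)
def trieGet : List Char → PTrie → Int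
  | [], .mk n _ => n
  | c :: cs, .mk _ k =>
      match kidsFind k c with
      | none => 0
      | some child => trieGet cs child

-- the nonempty prefixes of cs, shortest first
def prefixesNE : List Char → List (List Char)
  | [] => []
  | c :: cs => [c] :: (prefixesNE cs).map (c :: ·)

lemma kidsFind_kidsSet (k : PKids) (c c' : Char) (t : PTrie) :
    kidsFind (kidsSet k c t) c' = if c' = c then some t else kidsFind k c' := by
  match k with
  | .nil => simp [kidsSet, kidsFind]
  | .cons c0 t0 rest =>
    have ih := kidsFind_kidsSet rest c c' t
    simp only [kidsSet]
    by_cases h1 : c = c0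
    · subst h1
      simp only [kidsFind]
      by_cases h2 : c' = c <;> simp [kidsFind, h2]
    · simp only [if_neg h1, kidsFind]
      by_cases h2 : c' = c0
      · have hcc : c' ≠ c := by rw [h2]; exact fun h => h1 h.symm
        have h1' : c0 ≠ c := fun h => h1 h.symm
        simp [h2, h1']
      · simp [h2, ih]

lemma trieGet_empty (v : List Char) : trieGet v (.mk 0 .nil) = 0 := by
  cases v <;> simp [trieGet, kidsFind]

lemma trieGet_insert (w v : List Char) (t : PTrie) :
    trieGet v (trieInsert w t) = trieGet v t + (if v = w then 1 else 0) := by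
  induction w generalizing v t with
  | nil =>
    cases t with | mk n k =>
    cases v with
    | nil => simp [trieInsert, trieGet]
    | cons c cs => simp [trieInsert, trieGet]
  | cons cw ws ih =>
    cases t with | mk n k =>
    cases v with
    | nil => simp [trieInsert, trieGet]
    | cons c cs =>
      simp only [trieInsert, trieGet, kidsFind_kidsSet]
      by_cases hc : c = cw
      · subst hc
        cases hfind : kidsFind k c with
        | none =>
          simp [ih, trieGet_empty]
        | some child =>
          simp [ih]
      · simp [hc]

lemma trieGet_foldl_insert (ws : List String) (t : PTrie) (v : List Char) :
    trieGet v (ws.foldl (fun t w => trieInsert w.toList t) t)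
      = trieGet v t + ((ws.map String.toList).count v : Int) := by
  induction ws generalizing t with
  | nil => simp
  | cons w rest ih =>
    simp only [List.foldl_cons, List.map_cons, ih, trieGet_insert]
    by_cases h : v = w.toList
    · simp [h]
      ring
    · simp [Ne.symm h, h]

-- the walk computes the sum of the stored values over all nonempty prefixes
lemma trieWalk_eq_sum (cs : List Char) (t : PTrie) (acc : Int) :
    trieWalk cs t acc = acc + ((prefixesNE cs).map (fun p => trieGet p t)).sum := by
  induction cs generalizing t acc with
  | nil => simp [trieWalk, prefixesNE]
  | cons c rest ih =>
    cases t with | mk n k =>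
    simp only [trieWalk, prefixesNE, List.map_cons, List.map_map, List.sum_cons]
    cases hfind : kidsFind k c with
    | none =>
      have hz : ∀ p, trieGet (c :: p) (PTrie.mk n k) = 0 := by
        intro p; simp [trieGet, hfind]
      simp only [Function.comp_def]
      simp [trieGet, hfind, List.sum_eq_zero]
    | some child =>
      have hstep : ∀ p, trieGet (c :: p) (PTrie.mk n k) = trieGet p child := by
        intro p; simp [trieGet, hfind]
      have hhead : trieGet [c] (PTrie.mk n k) = child.endCount := by
        cases child with | mk m kk => simp [trieGet, hfind, PTrie.endCount]
      show trieWalk rest child (acc + child.endCount) = _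
      rw [ih child (acc + child.endCount)]
      have hnil : trieGet [] child = child.endCount := by
        cases child with | mk m kk => simp [trieGet, PTrie.endCount]
      simp only [Function.comp_def, hstep, hnil]
      ring

-- A's inner scan of words counts the occurrences of the current prefix
lemma inner_scan_eq_count (words : List String) (fl : List Char) (c : Int) :
    words.foldl (fun count pref => if pref.toList == fl then count + 1 else count) c
      = c + ((words.map String.toList).count fl : Int) := by
  induction words generalizing c with
  | nil => simp
  | cons w ws ih =>
    simp only [List.foldl_cons, List.map_cons, ih]
    by_cases h : w.toList = fl
    · simp [h]
      ring
    · simp [h]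

-- A's outer walk sums, over the nonempty prefixes of cs, the multiplicity of
-- fl ++ prefix among the words
lemma a_walk_eq_sum (words : List String) (cs fl : List Char) (c : Int) :
    (cs.foldl
      (fun (st : List Char × Int) i =>
        let firstLetters := st.1 ++ [i]
        (firstLetters,
          words.foldl (fun count pref => if pref.toList == firstLetters then count + 1 else count) st.2))
      (fl, c)).2
    = c + ((prefixesNE cs).map
        (fun p => ((words.map String.toList).count (fl ++ p) : Int))).sum := by
  induction cs generalizing fl c with
  | nil => simp [prefixesNE]
  | cons i rest ih =>
    simp only [List.foldl_cons, prefixesNE, List.map_cons, List.map_map, List.sum_cons]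
    rw [inner_scan_eq_count words (fl ++ [i]) c, ih (fl ++ [i])]
    simp only [Function.comp_def, List.append_assoc, List.cons_append, List.nil_append]
    ring

-- ===== VERDICT (by name: the statement is the Claim_ definition above) =====
theorem countPrefixes_spec : Claim_equal_countPrefixes := by
  intro words s _
  unfold Spec_countPrefixes countPrefixes countPrefixes_alt
  rw [a_walk_eq_sum words s.toList [] 0, trieWalk_eq_sum]
  simp [trieGet_foldl_insert, trieGet_empty]
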